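-- pv_equiv track=rewrite | github.com/wesc111/sudoku_numpy | sudoku_np1.py | checkValidHouse
-- ===== SOURCE A (Python) =====
-- def checkValidHouse(houseList):
--     """check if the house list is valid (each value from 1 to 9 shall be exactly one time within the list)"""
--     validList=[1,2,3,4,5,6,7,8,9]
--     if len(houseList)!=9:
--         return False
--     for i in range(0,9):
--         if houseList[i]<1 or  houseList[i]>9:
--             return False
--         if houseList[i] in validList:
--             validList.remove(houseList[i])
--     if len(validList)==0:
--         return True
--     return False
-- ===== SOURCE B (Python) =====
-- def checkValidHouse(houseList):
--     """check if the house list is valid (each value from 1 to 9 shall be exactly one time within the list)"""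
--     return sorted(houseList) == list(range(1, 10))
-- ===== Notes on version B (the rewrite author's own statement) =====
-- stated objective: simpler
-- what changed: Replaced the scan-and-remove checklist loop (with length and range guards) by a single sort-and-compare against the canonical list [1..9], which captures length, range and exactly-once at once.
import Mathlib
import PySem

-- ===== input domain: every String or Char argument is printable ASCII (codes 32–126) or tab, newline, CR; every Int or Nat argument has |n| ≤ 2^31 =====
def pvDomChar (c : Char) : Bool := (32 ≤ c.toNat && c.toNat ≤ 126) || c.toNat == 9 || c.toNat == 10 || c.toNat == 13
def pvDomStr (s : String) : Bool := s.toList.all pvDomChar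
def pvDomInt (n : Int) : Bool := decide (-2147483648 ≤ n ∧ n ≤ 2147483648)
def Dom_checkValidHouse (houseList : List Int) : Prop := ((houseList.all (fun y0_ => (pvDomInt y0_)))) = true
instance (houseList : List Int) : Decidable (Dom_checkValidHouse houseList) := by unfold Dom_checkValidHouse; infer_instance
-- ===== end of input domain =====

-- B replaces A's scan-and-remove checklist loop by sort-and-compare against [1..9]; objective: simpler.


-- ===== PORT A =====
-- loop 'for i in range(0,9)' with state validList; early 'return False' = the false branches
def goA (houseList : List Int) : List Int → List Int → Bool
  | [], valid => valid.length == 0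
  | i :: is, valid =>
    match PySem.List.pyGet? houseList i with
    | none => false
    | some x =>
      if x < 1 || 9 < x then false
      else if valid.contains x then
        goA houseList is ((PySem.List.remove? valid x).getD valid)
      else goA houseList is valid

def checkValidHouse (houseList : List Int) : Bool :=
  let validList : List Int := [1, 2, 3, 4, 5, 6, 7, 8, 9]
  if houseList.length ≠ 9 then false
  else goA houseList (PySem.List.pyRange 0 9 1) validList

-- ===== PORT B =====
def checkValidHouse_alt (houseList : List Int) : Bool :=
  PySem.List.sorted houseList (fun x => x) false == PySem.List.pyRange 1 10 1

-- ===== PRECONDITION & SPEC =====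
def Spec_checkValidHouse (houseList : List Int) (out : Bool) : Prop := out = checkValidHouse_alt houseList
instance (houseList : List Int) (out : Bool) : Decidable (Spec_checkValidHouse houseList out) := by unfold Spec_checkValidHouse; infer_instance

-- ===== CLAIM (what is proved, stated in full; the proofs are below) =====
def Claim_equal_checkValidHouse : Prop := ∀ (houseList : List Int), Dom_checkValidHouse houseList → Spec_checkValidHouse houseList (checkValidHouse houseList)

-- ===== LEMMAS AND PROOFS =====

-- the same loop, driven directly by the elements (proof helper)
def goA' : List Int → List Int → Bool
  | [], valid => valid.length == 0
  | x :: xs, valid =>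
    if x < 1 || 9 < x then false
    else if valid.contains x then goA' xs ((PySem.List.remove? valid x).getD valid)
    else goA' xs valid

lemma goA_bridge (l : List Int) (hl : l.length = 9) (valid : List Int) :
    goA l (PySem.List.pyRange 0 9 1) valid = goA' l valid := by
  match l, hl with
  | [a, b, c, d, e, f, g, h, i], _ => rfl

lemma goA'_iff (rest : List Int) (valid : List Int) (hn : valid.Nodup) :
    goA' rest valid = true ↔
      (∀ x ∈ rest, 1 ≤ x ∧ x ≤ 9) ∧ (∀ v ∈ valid, v ∈ rest) := by
  induction rest generalizing valid with
  | nil =>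
    simp [goA', List.eq_nil_iff_forall_not_mem]
  | cons x xs ih =>
    by_cases hb : x < 1 ∨ 9 < x
    · have hstep : goA' (x :: xs) valid = false := by
        unfold goA'
        rcases hb with hb | hb <;> simp [hb]
      rw [hstep]
      constructor
      · intro h; exact absurd h (by simp)
      · rintro ⟨h1, -⟩
        have := h1 x (by simp)
        omega
    · have h1 : ¬ x < 1 := by omega
      have h2 : ¬ 9 < x := by omega
      by_cases hm : x ∈ valid
      · have hrm : (PySem.List.remove? valid x).getD valid = valid.erase x := by
          rw [PySem.List.remove?_eq_some_erase valid x hm]; rfl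
        have hstep : goA' (x :: xs) valid = goA' xs (valid.erase x) := by
          conv_lhs => rw [goA'.eq_def]
          simp [h1, h2, hm, hrm]
        rw [hstep, ih (valid.erase x) (hn.erase x)]
        constructor
        · rintro ⟨ha, hc⟩
          refine ⟨?_, ?_⟩
          · intro y hy
            rcases List.mem_cons.mp hy with rfl | hy
            · omega
            · exact ha y hy
          · intro v hv
            by_cases hvx : v = x
            · subst hvx; exact List.mem_cons_self
            · exact List.mem_cons_of_mem _ (hc v ((hn.mem_erase_iff).mpr ⟨hvx, hv⟩))
        · rintro ⟨ha, hc⟩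
          refine ⟨fun y hy => ha y (List.mem_cons_of_mem _ hy), ?_⟩
          intro v hv
          have hvv := (hn.mem_erase_iff).mp hv
          rcases List.mem_cons.mp (hc v hvv.2) with rfl | h
          · exact absurd rfl hvv.1
          · exact h
      · have hstep : goA' (x :: xs) valid = goA' xs valid := by
          conv_lhs => rw [goA'.eq_def]
          simp [h1, h2, hm]
        rw [hstep, ih valid hn]
        constructor
        · rintro ⟨ha, hc⟩
          refine ⟨?_, fun v hv => List.mem_cons_of_mem _ (hc v hv)⟩
          intro y hy
          rcases List.mem_cons.mp hy with rfl | hy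
          · omega
          · exact ha y hy
        · rintro ⟨ha, hc⟩
          refine ⟨fun y hy => ha y (List.mem_cons_of_mem _ hy), ?_⟩
          intro v hv
          rcases List.mem_cons.mp (hc v hv) with rfl | h
          · exact absurd hv hm
          · exact h

lemma A_iff (l : List Int) :
    checkValidHouse l = true ↔ l.Perm [1, 2, 3, 4, 5, 6, 7, 8, 9] := by
  by_cases hl : l.length = 9
  · unfold checkValidHouse
    rw [if_neg (by simp [hl]), goA_bridge l hl,
        goA'_iff l [1, 2, 3, 4, 5, 6, 7, 8, 9] (by decide)]
    constructor
    · rintro ⟨-, hc⟩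
      have hsub : List.Subperm ([1, 2, 3, 4, 5, 6, 7, 8, 9] : List Int) l :=
        (List.Nodup.subperm (by decide) (fun v hv => hc v hv))
      exact (hsub.perm_of_length_le (by simp [hl])).symm
    · intro h
      refine ⟨?_, fun v hv => h.mem_iff.mpr hv⟩
      intro x hx
      have hx' : x ∈ ([1, 2, 3, 4, 5, 6, 7, 8, 9] : List Int) := h.mem_iff.mp hx
      simp at hx'
      omega
  · have hA : checkValidHouse l = false := by
      simp [checkValidHouse, hl]
    rw [hA]
    simp only [Bool.false_eq_true, false_iff]
    intro h
    exact hl (by simpa using h.length_eq)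

lemma B_iff (l : List Int) :
    checkValidHouse_alt l = true ↔ l.Perm [1, 2, 3, 4, 5, 6, 7, 8, 9] := by
  unfold checkValidHouse_alt
  have hr : PySem.List.pyRange 1 10 1 = ([1, 2, 3, 4, 5, 6, 7, 8, 9] : List Int) := by decide
  rw [hr, beq_iff_eq]
  constructor
  · intro h
    have hp := PySem.List.sorted_perm l (fun x => x) false
    rw [h] at hp
    exact hp.symm
  · intro h
    have hs := h.symm
    exact PySem.List.sorted_eq_of_perm_of_pairwise_lt l [1, 2, 3, 4, 5, 6, 7, 8, 9] (fun x => x) hs (by decide)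

-- ===== VERDICT (by name: the statement is the Claim_ definition above) =====
theorem checkValidHouse_spec : Claim_equal_checkValidHouse := by
  intro l _
  unfold Spec_checkValidHouse
  rw [Bool.eq_iff_iff, A_iff, B_iff]
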